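-- pv_equiv track=rewrite | github.com/MichaelAlo/complete_memory_graph | src/standardise/pipeline.py | _gate
-- ===== SOURCE A (Python) =====
-- from typing import Any, cast
--
-- def _gate(rows: list[dict[str, Any]], required_fields: list[str]) -> list[str]:
--     failed: list[str] = []
--     if not rows:
--         failed.append("row_count=0")
--     for field in required_fields:
--         null_count = sum(1 for r in rows if r.get(field) is None)
--         if null_count:
--             failed.append(f"nulls:{field}={null_count}")
--     return failed
-- ===== SOURCE B (Python) =====
-- def _gate(rows, required_fields):
--     header = ["row_count=0"] if not rows else []
--     distinct = list(dict.fromkeys(required_fields))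
--     counts = dict.fromkeys(distinct, 0)
--     for r in rows:
--         for f in distinct:
--             if r.get(f) is None:
--                 counts[f] += 1
--     return header + [f"nulls:{f}={counts[f]}" for f in required_fields if counts[f]]
-- ===== Notes on version B (the rewrite author's own statement) =====
-- stated objective: alternative
-- what changed: Replaces A's per-field full scans of rows and its append-accumulator loop with one row-major pass accumulating a zero-initialised null-count table keyed by the de-duplicated required fields, emitted by a comprehension (filter+map) after the empty-rows header.
import Mathlib
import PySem

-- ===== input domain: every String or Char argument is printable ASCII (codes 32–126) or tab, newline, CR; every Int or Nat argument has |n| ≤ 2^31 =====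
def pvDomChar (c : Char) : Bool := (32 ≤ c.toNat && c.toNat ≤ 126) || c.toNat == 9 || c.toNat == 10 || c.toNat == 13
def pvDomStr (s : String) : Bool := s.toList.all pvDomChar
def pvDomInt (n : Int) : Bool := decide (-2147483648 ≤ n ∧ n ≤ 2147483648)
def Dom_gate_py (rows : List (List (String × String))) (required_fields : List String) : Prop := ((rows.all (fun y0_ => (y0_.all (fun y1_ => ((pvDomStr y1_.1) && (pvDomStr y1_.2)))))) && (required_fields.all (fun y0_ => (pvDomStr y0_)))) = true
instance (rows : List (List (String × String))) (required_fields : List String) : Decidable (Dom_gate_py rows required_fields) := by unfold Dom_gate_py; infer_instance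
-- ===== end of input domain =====

-- B replaces A's per-field scans of rows (with an append-accumulator) by one row-major pass over a
-- zero-initialised counter table keyed by the de-duplicated fields, emitted by a comprehension (objective: alternative).

-- ===== PORT A =====
-- 'r.get(field) is None' : in the association-list model a row's value is a String, so it is None iff the key is absent.
def gate_py (rows : List (List (String × String))) (required_fields : List String) : List String :=
  let failed : List String := if rows = [] then ["row_count=0"] else []
  required_fields.foldl (fun failed field =>
    let null_count : Int :=
      rows.foldl (fun s r => if (PySem.Dict.get? (PySem.Dict.mk r) field).isNone then s + 1 else s) 0
    if null_count ≠ 0 then failed ++ ["nulls:" ++ field ++ "=" ++ PySem.Int.toStr null_count]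
    else failed) failed

-- ===== PORT B =====
-- header; distinct = list(dict.fromkeys(required_fields)); counts = dict.fromkeys(distinct, 0);
-- row-major counting pass; then 'header + [comprehension]'.
-- 'counts[f]' is ported as getD (the key is always present, so the default is never used).
def gate_py_alt (rows : List (List (String × String))) (required_fields : List String) : List String :=
  let header : List String := if rows = [] then ["row_count=0"] else []
  let distinct : List String := PySem.List.dedup required_fields
  let counts : PySem.Dict String Int :=
    rows.foldl (fun d r =>
        distinct.foldl (fun d f =>
          if (PySem.Dict.get? (PySem.Dict.mk r) f).isNone then d.modify f 0 (· + 1) else d) d)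
      (distinct.foldl (fun d f => d.insert f 0) PySem.Dict.empty)
  header ++ (required_fields.filter (fun f => counts.getD f 0 ≠ 0)).map
    (fun f => "nulls:" ++ f ++ "=" ++ PySem.Int.toStr (counts.getD f 0))

-- ===== PRECONDITION & SPEC =====
def Spec_gate_py (rows : List (List (String × String))) (required_fields : List String) (out : List String) : Prop := out = gate_py_alt rows required_fields
instance (rows : List (List (String × String))) (required_fields : List String) (out : List String) : Decidable (Spec_gate_py rows required_fields out) := by unfold Spec_gate_py; infer_instance

-- ===== CLAIM (what is proved, stated in full; the proofs are below) =====
def Claim_equal_gate_py : Prop := ∀ (rows : List (List (String × String))) (required_fields : List String), Dom_gate_py rows required_fields → Spec_gate_py rows required_fields (gate_py rows required_fields)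

-- ===== LEMMAS AND PROOFS =====

-- A's append-accumulator loop is 'acc ++ filter-then-map'
theorem pv_foldl_append_filter_map {α : Type} (p : α → Prop) [DecidablePred p] (g : α → String)
    (l : List α) (acc : List String) :
    l.foldl (fun acc x => if p x then acc ++ [g x] else acc) acc
      = acc ++ (l.filter (fun x => decide (p x))).map g := by
  induction l generalizing acc with
  | nil => simp
  | cons x xs ih =>
    simp only [List.foldl_cons, List.filter_cons]
    by_cases h : p x
    · simp [h, ih]
    · simp [h, ih]

-- the zero-initialising pass leaves every count at 0
theorem pv_init_getD (l : List String) (f : String) (d : PySem.Dict String Int)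
    (h : d.getD f 0 = 0) :
    (l.foldl (fun d x => d.insert x (0 : Int)) d).getD f 0 = 0 := by
  induction l generalizing d with
  | nil => exact h
  | cons x xs ih =>
    simp only [List.foldl_cons]
    apply ih
    rw [PySem.Dict.getD_insert]
    split <;> simp [h]

-- a guarded modify-loop is the modify-loop over the filtered list
theorem pv_inner_filter (p : String → Bool) (l : List String) (d : PySem.Dict String Int) :
    l.foldl (fun d field => if p field then d.modify field 0 (· + 1) else d) d
      = (l.filter p).foldl (fun d field => d.modify field 0 (· + 1)) d := by
  induction l generalizing d with
  | nil => rfl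
  | cons x xs ih =>
    simp only [List.foldl_cons, List.filter_cons]
    by_cases h : p x
    · simp [h, ih]
    · simp [h, ih]

-- value of the accumulated counter at any field
theorem pv_counts_getD (P : List (String × String) → String → Bool)
    (rows : List (List (String × String))) (distinct : List String)
    (field : String) (d : PySem.Dict String Int) :
    (rows.foldl (fun d r =>
        distinct.foldl (fun d f => if P r f then d.modify f 0 (· + 1) else d) d) d).getD field 0
      = d.getD field 0
        + (rows.map (fun r => (((distinct.filter (fun f => P r f)).count field : Nat) : Int))).sum := by
  induction rows generalizing d with
  | nil => simp
  | cons r rs ih =>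
    simp only [List.foldl_cons, List.map_cons, List.sum_cons]
    rw [ih, pv_inner_filter, PySem.Dict.getD_foldl_modify_add_one]
    ring

-- for a field occurring in a Nodup distinct list, the per-row contribution is the 0/1 null test
theorem pv_count_filter (distinct : List String) (hnd : distinct.Nodup) (field : String)
    (hm : field ∈ distinct) (q : String → Bool) :
    ((distinct.filter q).count field : Nat) = if q field then 1 else 0 := by
  induction distinct with
  | nil => cases hm
  | cons x xs ih =>
    rcases List.nodup_cons.mp hnd with ⟨hx, hxs⟩
    rcases List.mem_cons.mp hm with h | h
    · subst h
      have hc : xs.count field = 0 := List.count_eq_zero.mpr hx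
      by_cases hq : q field
      · simp [List.count_filter, hq, hc, List.count_cons_self]
      · rw [if_neg hq, List.count_eq_zero]
        simp [List.mem_filter, hq]
    · have hne : x ≠ field := fun e => hx (e ▸ h)
      by_cases hq : q x
      · simpa [List.filter_cons, hq, List.count_cons, hne] using ih hxs h
      · simpa [List.filter_cons, hq] using ih hxs h

-- A's per-field sum as a mapped sum
theorem pv_a_sum (p : List (String × String) → Bool)
    (rows : List (List (String × String))) (s : Int) :
    rows.foldl (fun s r => if p r then s + 1 else s) s
      = s + (rows.map (fun r => if p r then (1 : Int) else 0)).sum := by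
  induction rows generalizing s with
  | nil => simp
  | cons r rs ih =>
    simp only [List.foldl_cons, List.map_cons, List.sum_cons]
    by_cases h : p r
    · simp [h, ih]; ring
    · simp [h, ih]

-- ===== VERDICT (by name: the statement is the Claim_ definition above) =====
theorem gate_py_spec : Claim_equal_gate_py := by
  intro rows required_fields _
  unfold Spec_gate_py gate_py gate_py_alt
  -- both sides relative to the same header
  rw [pv_foldl_append_filter_map
        (fun field => rows.foldl (fun s r => if (PySem.Dict.get? (PySem.Dict.mk r) field).isNone then s + 1 else s) (0 : Int) ≠ 0)
        (fun field => "nulls:" ++ field ++ "=" ++ PySem.Int.toStr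
          (rows.foldl (fun s r => if (PySem.Dict.get? (PySem.Dict.mk r) field).isNone then s + 1 else s) (0 : Int)))]
  -- pointwise: B's table lookup equals A's per-field scan, for fields of required_fields
  have hkey : ∀ field ∈ required_fields,
      ((rows.foldl (fun (d : PySem.Dict String Int) r =>
          (PySem.List.dedup required_fields).foldl
            (fun d f => if (PySem.Dict.get? (PySem.Dict.mk r) f).isNone then d.modify f 0 (· + 1) else d) d)
        ((PySem.List.dedup required_fields).foldl (fun d f => d.insert f 0) PySem.Dict.empty)).getD field (0 : Int))
      = rows.foldl (fun (s : Int) r => if (PySem.Dict.get? (PySem.Dict.mk r) field).isNone then s + 1 else s) (0 : Int) := by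
    intro field hmem
    have hm : field ∈ PySem.List.dedup required_fields := (PySem.List.mem_dedup required_fields field).mpr hmem
    have hnd : (PySem.List.dedup required_fields).Nodup := PySem.List.nodup_dedup required_fields
    rw [pv_counts_getD, pv_a_sum, pv_init_getD _ _ _ (by rfl)]
    congr 1
    congr 1
    refine List.map_congr_left ?_
    intro r _
    rw [pv_count_filter _ hnd field hm]
    split <;> simp
  -- rewrite B's filter and map using hkey
  have hfil : (required_fields.filter (fun f =>
        decide (((rows.foldl (fun (d : PySem.Dict String Int) r =>
          (PySem.List.dedup required_fields).foldl
            (fun d f => if (PySem.Dict.get? (PySem.Dict.mk r) f).isNone then d.modify f 0 (· + 1) else d) d)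
        ((PySem.List.dedup required_fields).foldl (fun d f => d.insert f 0) PySem.Dict.empty)).getD f (0 : Int)) ≠ 0)))
      = required_fields.filter (fun f =>
        decide (rows.foldl (fun (s : Int) r => if (PySem.Dict.get? (PySem.Dict.mk r) f).isNone then s + 1 else s) (0 : Int) ≠ 0)) := by
    apply List.filter_congr
    intro f hf
    simp only [hkey f hf]
  simp only [hfil]
  congr 1
  apply List.map_congr_left
  intro f hf
  have hf' : f ∈ required_fields := (List.mem_filter.mp hf).1
  rw [hkey f hf']
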